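-- pv_equiv track=rewrite | github.com/jnsturgis/SpectroscoPy | tools_spc/ftir_sidechains.py | get_composition
-- ===== SOURCE A (Python) =====
-- def get_composition( sequence: str ):
--     """
--     From a sequence string of single-letter amino-acid codes calculate the composition.
--
--     The single letter codes are augmented by + for an unblocked N-terminal
--     and - for an unblocked C terminal. The composition is returned as an array
--     of lists in the form ['Code', count ].
--     The routine can also handle fasta files so all lines starting with '>'
--     are ignored.
--     """
--     composition = []
--     ignore = False
--     for res in sequence:
--         if res == '>':
--             ignore = True
--         elif res== '\n':
--             ignore = False
--         elif res.isspace():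
--             pass
--         elif not ignore:
--             found = False
--             for item in composition:
--                 if item[0] == res:
--                     item[1] = item[1] + 1
--                     found = True
--             if not found:
--                 composition.append([res,1])
--
--     return composition
-- ===== SOURCE B (Python) =====
-- def get_composition(sequence: str):
--     """Staged rewrite: (1) collect the characters that count (cut each line at
--     its first '>', drop whitespace), (2) dedupe in first-appearance order,
--     (3) derive each count by scanning the collected list with list.count."""
--     kept = []
--     for line in sequence.split('\n'):
--         body = line.split('>', 1)[0]
--         kept.extend(c for c in body if not c.isspace())
--     return [[c, kept.count(c)] for c in dict.fromkeys(kept)]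
-- ===== Notes on version B (the rewrite author's own statement) =====
-- stated objective: alternative
-- what changed: Replaces A's one-pass state machine that maintains running counts (rescanning the composition list on every counted character) with a staged pipeline that keeps no counter at all: collect the counted characters (split on newlines, truncate each line at its first '>', drop whitespace), dedupe them in first-appearance order, then derive each count afterwards by scanning the collected list with list.count.
import Mathlib
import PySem

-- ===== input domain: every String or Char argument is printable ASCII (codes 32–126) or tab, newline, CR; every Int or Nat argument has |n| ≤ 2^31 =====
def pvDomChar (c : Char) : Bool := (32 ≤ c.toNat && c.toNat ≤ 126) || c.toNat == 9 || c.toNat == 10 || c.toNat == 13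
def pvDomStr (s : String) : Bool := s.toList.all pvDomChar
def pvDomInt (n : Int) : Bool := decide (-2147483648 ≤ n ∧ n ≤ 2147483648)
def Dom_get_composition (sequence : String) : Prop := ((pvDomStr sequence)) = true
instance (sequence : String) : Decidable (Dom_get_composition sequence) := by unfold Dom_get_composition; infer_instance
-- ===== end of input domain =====

-- B replaces A's one-pass state machine with running counts by a staged pipeline with no
-- counter: collect the counted characters (line split, truncate at '>', drop whitespace),
-- dedupe in first-appearance order, then derive each count by list.count. Objective: alternative.

-- ===== PORT A =====
-- the inner 'for item in composition' loop: increments every matching item, reports whether one was found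
def pvBump (composition : List (String × Int)) (res : String) : List (String × Int) × Bool :=
  match composition with
  | [] => ([], false)
  | item :: rest =>
      let r := pvBump rest res
      ((if item.1 = res then (item.1, item.2 + 1) else item) :: r.1, (item.1 = res) || r.2)

def pvStepA (st : List (String × Int) × Bool) (res : Char) : List (String × Int) × Bool :=
  if res = '>' then (st.1, true)
  else if res = '\n' then (st.1, false)
  else if PySem.Chars.isspace res then st
  else if st.2 = false then
    let r := pvBump st.1 (String.ofList [res])
    ((if r.2 then r.1 else r.1 ++ [(String.ofList [res], 1)]), st.2)
  else st

def get_composition (sequence : String) : List (String × Int) :=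
  (sequence.toList.foldl pvStepA ([], false)).1

-- ===== PORT B =====
-- "body = line.split('>', 1)[0]; kept.extend(c for c in body if not c.isspace())"
-- (the part of the line before its first '>' is takeWhile (· ≠ '>'), exact)
def pvLineKept (line : List Char) : List Char :=
  (line.takeWhile (· ≠ '>')).filter (fun c => !PySem.Chars.isspace c)

def get_composition_alt (sequence : String) : List (String × Int) :=
  let kept := (PySem.Chars.splitOn sequence.toList ['\n']).foldl
      (fun acc line => acc ++ pvLineKept line) []
  -- "[[c, kept.count(c)] for c in dict.fromkeys(kept)]"
  (PySem.List.dedup kept).map (fun c => (String.ofList [c], (kept.count c : Int)))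

-- ===== PRECONDITION & SPEC =====
def Spec_get_composition (sequence : String) (out : List (String × Int)) : Prop := out = get_composition_alt sequence
instance (sequence : String) (out : List (String × Int)) : Decidable (Spec_get_composition sequence out) := by unfold Spec_get_composition; infer_instance

-- ===== CLAIM (what is proved, stated in full; the proofs are below) =====
def Claim_equal_get_composition : Prop := ∀ (sequence : String), Dom_get_composition sequence → Spec_get_composition sequence (get_composition sequence)

-- ===== LEMMAS AND PROOFS =====

def pvSingle (c : Char) : String := String.ofList [c]

-- the characters A actually counts, as a state machine over the ignore flag
def pvKept : Bool → List Char → List Char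
  | _, [] => []
  | b, c :: cs =>
      if c = '>' then pvKept true cs
      else if c = '\n' then pvKept false cs
      else if PySem.Chars.isspace c then pvKept b cs
      else if b then pvKept b cs
      else c :: pvKept b cs

-- Python str.split('\n') as a structural recursion
def pvSplitNL : List Char → List (List Char)
  | [] => [[]]
  | c :: cs => if c = '\n' then [] :: pvSplitNL cs else (pvSplitNL cs).modifyHead (c :: ·)

-- one counted character on A's association list
def pvTallyStep (l : List (String × Int)) (c : Char) : List (String × Int) :=
  let r := pvBump l (pvSingle c)
  if r.2 then r.1 else r.1 ++ [(pvSingle c, 1)]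

-- A's tally at any point, expressed by B's staged formula over the prefix of kept chars
def pvTally (pre : List Char) : List (String × Int) :=
  (PySem.List.dedup pre).map (fun c => (pvSingle c, (pre.count c : Int)))

lemma pvSplitNL_ne_nil (l : List Char) : pvSplitNL l ≠ [] := by
  cases l with
  | nil => simp [pvSplitNL]
  | cons c cs =>
      simp only [pvSplitNL]
      split
      · simp
      · cases h : pvSplitNL cs with
        | nil => exact absurd h (pvSplitNL_ne_nil cs)
        | cons a t => simp

lemma pvGo_spec (fuel : Nat) : ∀ (l : List Char) (cur : List Char) (acc : List (List Char)),
    l.length ≤ fuel →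
    PySem.Chars.splitOn.go ['\n'] fuel l cur acc
      = acc.reverse ++ (pvSplitNL l).modifyHead (cur.reverse ++ ·) := by
  induction fuel with
  | zero =>
    intro l cur acc hl
    have hnil : l = [] := List.length_eq_zero_iff.mp (Nat.le_zero.mp hl)
    subst hnil
    rw [PySem.Chars.splitOn.go.eq_def]
    simp [pvSplitNL]
  | succ fuel ih =>
    intro l cur acc hl
    cases l with
    | nil =>
      rw [PySem.Chars.splitOn.go.eq_def]
      simp [pvSplitNL]
    | cons c rest =>
      have hlen : rest.length ≤ fuel := by simpa using hl
      rw [PySem.Chars.splitOn.go.eq_def]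
      by_cases hc : c = '\n'
      · subst hc
        have hpre : List.isPrefixOf ['\n'] ('\n' :: rest) = true := by
          simp [List.isPrefixOf]
        simp only [hpre, if_true, List.length_singleton, List.drop_succ_cons, List.drop_zero]
        rw [ih rest [] (cur.reverse :: acc) hlen]
        cases hx : pvSplitNL rest with
        | nil => exact absurd hx (pvSplitNL_ne_nil rest)
        | cons a t => simp [pvSplitNL, hx]
      · have hpre : List.isPrefixOf ['\n'] (c :: rest) = false := by
          simp [List.isPrefixOf]
          exact fun e => hc e.symm
        simp only [hpre, Bool.false_eq_true, if_false]
        rw [ih rest (c :: cur) acc hlen]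
        cases hx : pvSplitNL rest with
        | nil => exact absurd hx (pvSplitNL_ne_nil rest)
        | cons a t => simp [pvSplitNL, hx, hc]

lemma pvSplitOn_eq (l : List Char) : PySem.Chars.splitOn l ['\n'] = pvSplitNL l := by
  have h := pvGo_spec (l.length + 1) l [] [] (by omega)
  rw [show List.reverse ([] : List (List Char)) = [] from rfl] at h
  cases hx : pvSplitNL l with
  | nil => exact absurd hx (pvSplitNL_ne_nil l)
  | cons a t =>
    rw [hx] at h
    simpa [PySem.Chars.splitOn] using h

-- A's fold is a pure tally over the kept characters
lemma pvFoldA_eq (l : List Char) : ∀ (comp : List (String × Int)) (b : Bool),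
    (l.foldl pvStepA (comp, b)).1 = (pvKept b l).foldl pvTallyStep comp := by
  induction l with
  | nil => intro comp b; simp [pvKept]
  | cons c cs ih =>
    intro comp b
    by_cases h1 : c = '>'
    · simp [pvStepA, pvKept, h1, ih]
    · by_cases h2 : c = '\n'
      · simp [pvStepA, pvKept, h2, ih]
      · by_cases h3 : PySem.Chars.isspace c
        · simp [pvStepA, pvKept, h1, h2, h3, ih]
        · cases b with
          | false => simp [pvStepA, pvKept, h1, h2, h3, ih, pvTallyStep, pvSingle]
          | true => simp [pvStepA, pvKept, h1, h2, h3, ih]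

-- the ignore-flag state machine equals the line decomposition
lemma pvKept_eq (l : List Char) :
    pvKept false l = (pvSplitNL l).flatMap pvLineKept
      ∧ pvKept true l = ((pvSplitNL l).tail).flatMap pvLineKept := by
  induction l with
  | nil => simp [pvKept, pvSplitNL, pvLineKept]
  | cons c cs ih =>
    by_cases h2 : c = '\n'
    · subst h2
      constructor
      · simp [pvKept, pvSplitNL, ih.1, pvLineKept]
      · simp [pvKept, pvSplitNL, ih.1]
    · obtain ⟨h, t, hht⟩ : ∃ h t, pvSplitNL cs = h :: t := by
        cases hx : pvSplitNL cs with
        | nil => exact absurd hx (pvSplitNL_ne_nil cs)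
        | cons a t => exact ⟨a, t, rfl⟩
      have hsplit : pvSplitNL (c :: cs) = (c :: h) :: t := by
        simp [pvSplitNL, h2, hht]
      by_cases h1 : c = '>'
      · subst h1
        constructor
        · simp [pvKept, hsplit, pvLineKept, ih.2, hht]
        · simp [pvKept, hsplit, ih.2, hht]
      · by_cases h3 : PySem.Chars.isspace c
        · constructor
          · simp [pvKept, h1, h2, h3, hsplit, pvLineKept, ih.1, hht]
          · simp [pvKept, h1, h2, h3, hsplit, ih.2, hht]
        · constructor
          · simp [pvKept, h1, h2, h3, hsplit, pvLineKept, ih.1, hht]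
          · simp [pvKept, h1, h2, h3, hsplit, ih.2, hht]

lemma pvSingle_inj {a b : Char} (h : pvSingle a = pvSingle b) : a = b := by
  unfold pvSingle at h
  have h2 := congrArg String.toList h
  simp at h2
  exact h2

-- pvBump on a tally-shaped list: increments the entry of c, finds it iff c occurs
lemma pvBump_tally (xs : List Char) (cnt : Char → Int) (c : Char) :
    pvBump (xs.map (fun c' => (pvSingle c', cnt c'))) (pvSingle c)
      = (xs.map (fun c' => (pvSingle c', if c' = c then cnt c' + 1 else cnt c')),
         decide (c ∈ xs)) := by
  induction xs with
  | nil => simp [pvBump]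
  | cons a t ih =>
    by_cases hac : a = c
    · subst hac
      simp [pvBump, ih]
    · have hne : pvSingle a ≠ pvSingle c := fun e => hac (pvSingle_inj e)
      simp [pvBump, ih, hne, hac, Ne.symm hac]

-- one tally step extends the prefix by one character
lemma pvTallyStep_eq (pre : List Char) (c : Char) :
    pvTallyStep (pvTally pre) c = pvTally (pre ++ [c]) := by
  unfold pvTally pvTallyStep
  rw [pvBump_tally]
  by_cases hc : c ∈ pre
  · have hmem : c ∈ PySem.List.dedup pre := by
      rw [PySem.List.mem_dedup]; exact hc
    have hded : PySem.List.dedup (pre ++ [c]) = PySem.List.dedup pre := by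
      simp only [PySem.List.dedup_eq_ofList, PySem.Set.ofList_eq_foldl, List.foldl_append,
        List.foldl_cons, List.foldl_nil]
      rw [← PySem.Set.ofList_eq_foldl]
      simp [PySem.Set.add, PySem.Set.contains, hc, PySem.Set.mem_ofList]
    simp only [PySem.List.mem_dedup, hc, decide_true, if_true, hded]
    apply List.map_congr_left
    intro c' _
    by_cases h' : c' = c <;> simp [h', List.count_append, Ne.symm]
  · have hded : PySem.List.dedup (pre ++ [c]) = PySem.List.dedup pre ++ [c] := by
      simp only [PySem.List.dedup_eq_ofList, PySem.Set.ofList_eq_foldl, List.foldl_append,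
        List.foldl_cons, List.foldl_nil]
      rw [← PySem.Set.ofList_eq_foldl]
      simp [PySem.Set.add, PySem.Set.contains, hc, PySem.Set.mem_ofList]
    simp only [PySem.List.mem_dedup, hc, decide_false, Bool.false_eq_true, if_false, hded,
      List.map_append, List.map_cons, List.map_nil]
    congr 1
    · apply List.map_congr_left
      intro c' hc'
      have : c' ≠ c := by
        intro e; exact hc (e ▸ ((PySem.List.mem_dedup _ _).mp hc'))
      simp [this, List.count_append, Ne.symm]
    · simp [List.count_append, List.count_eq_zero_of_not_mem hc]

-- folding A's tally over kept characters yields B's staged formula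
lemma pvTally_main (k : List Char) : ∀ pre,
    k.foldl pvTallyStep (pvTally pre) = pvTally (pre ++ k) := by
  induction k with
  | nil => intro pre; simp
  | cons c t ih =>
    intro pre
    simp only [List.foldl_cons, pvTallyStep_eq]
    rw [ih (pre ++ [c])]
    simp

lemma pvFoldAppend (ls : List (List Char)) :
    ∀ acc : List Char, ls.foldl (fun acc line => acc ++ pvLineKept line) acc
      = acc ++ ls.flatMap pvLineKept := by
  induction ls with
  | nil => simp
  | cons a t ih => intro acc; simp [ih, List.flatMap_cons]

-- ===== VERDICT (by name: the statement is the Claim_ definition above) =====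
theorem get_composition_spec : Claim_equal_get_composition := by
  intro s _
  show get_composition s = get_composition_alt s
  unfold get_composition get_composition_alt
  rw [pvFoldA_eq, (pvKept_eq s.toList).1, pvSplitOn_eq, pvFoldAppend]
  have h0 : ([] : List (String × Int)) = pvTally [] := by simp [pvTally]
  rw [h0, pvTally_main]
  simp [pvTally, pvSingle]
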